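-- pv_equiv track=rewrite | github.com/CryptidRegrex/diskAlgorithms | prog3.py | cscanLocation
-- ===== SOURCE A (Python) =====
-- def parseQ(q, index=None):
--     cyl = 0
--     if not index:
--         item = q[0].split(',')
--         cyl = int(item[0])
--     else:
--         item = q[index].split(',')
--         cyl = int(item[0])
--     return cyl
--
-- def cscanLocation(queue, cylinder):
--     arrOfHighValues = []
--     arrOfLowValues = []
--     returnQ = []
--     index = 0
--     count = 0
--     for i in queue:
--         if (parseQ(queue, count) >= cylinder):
--             arrOfHighValues.append(i)
--         elif (parseQ(queue, count) < cylinder):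
--             arrOfLowValues.append(i)
--         count += 1
--     if (len(arrOfHighValues) > 0):
--         returnQ = sortCscan(arrOfHighValues)
--         index = queue.index(returnQ[0])
--     elif (len(arrOfLowValues) > 0):
--         returnQ = sortCscan(arrOfLowValues)
--         index = queue.index(returnQ[0])
--     return index
--
-- def sortCscan(array):
--     highI = 0
--     ret = None
--     for x in array:
--         if (parseQ(array, highI) <= parseQ(array)):
--             temp = array[0]
--             array[0] = array[highI]
--             array[highI] = temp
--         highI += 1
--     return array
-- ===== SOURCE B (Python) =====
-- def cscanLocation(queue, cylinder):
--     best_high = best_high_cyl = None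
--     best_low = best_low_cyl = None
--     for s in queue:
--         cyl = int(s.split(',')[0])
--         if cyl >= cylinder:
--             if best_high is None or cyl <= best_high_cyl:
--                 best_high, best_high_cyl = s, cyl
--         else:
--             if best_low is None or cyl <= best_low_cyl:
--                 best_low, best_low_cyl = s, cyl
--     chosen = best_high if best_high is not None else best_low
--     return queue.index(chosen) if chosen is not None else 0
-- ===== Notes on version B (the rewrite author's own statement) =====
-- stated objective: simpler
-- what changed: One pass over the queue keeping two running best candidates (last-seen minimum cylinder among >=cylinder and among <cylinder) replaces building two filtered arrays and running the swap-to-front sortCscan pass over one of them.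
import Mathlib
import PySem

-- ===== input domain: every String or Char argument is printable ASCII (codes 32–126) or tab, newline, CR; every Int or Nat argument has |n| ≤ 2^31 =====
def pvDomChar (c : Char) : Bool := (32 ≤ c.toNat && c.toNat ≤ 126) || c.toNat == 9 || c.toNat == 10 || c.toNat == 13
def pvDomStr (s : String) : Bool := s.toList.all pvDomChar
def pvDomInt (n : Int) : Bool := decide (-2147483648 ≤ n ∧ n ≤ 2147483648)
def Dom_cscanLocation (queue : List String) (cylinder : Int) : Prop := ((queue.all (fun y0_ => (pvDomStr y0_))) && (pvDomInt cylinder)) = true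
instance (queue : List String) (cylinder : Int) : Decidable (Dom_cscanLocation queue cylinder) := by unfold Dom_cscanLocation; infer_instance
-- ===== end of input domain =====

-- B replaces A's two filtered arrays plus swap-to-front sortCscan pass by one pass that keeps
-- two running best candidates; equivalence is about the return value (A mutates only its local arrays, never `queue`).

-- ===== PORT A =====

-- parseQ(q, index): int of the field before the first ',' of q[index]; `if not index`
-- also sends index == 0 through the q[0] branch. Parse failure / bad index (excluded by
-- Pre_cscanLocation) is defaulted, never reached on admitted inputs.
def parseQA (q : List String) (index : Int) : Int :=
  if index == 0 then
    (PySem.Int.ofStr? (((PySem.Str.split? ((PySem.List.pyGet? q 0).getD "") ",").getD []).headD "")).getD 0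
  else
    (PySem.Int.ofStr? (((PySem.Str.split? ((PySem.List.pyGet? q index).getD "") ",").getD []).headD "")).getD 0

-- sortCscan: for each position highI, swap array[0] and array[highI] when
-- parseQ(array, highI) <= parseQ(array); the loop variable x is unused.
def sortCscanA (array : List String) : List String :=
  (List.range array.length).foldl
    (fun arr (highI : Nat) =>
      if parseQA arr (highI : Int) ≤ parseQA arr 0 then
        PySem.List.pySetD (PySem.List.pySetD arr 0 (PySem.List.pyGetD arr (highI : Int) ""))
          (highI : Int) (PySem.List.pyGetD arr 0 "")
      else arr)
    array

def cscanLocation (queue : List String) (cylinder : Int) : Int :=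
  let acc := (PySem.List.enumerate queue).foldl
    (fun (p : List String × List String) ci =>
      if parseQA queue ci.1 ≥ cylinder then (p.1 ++ [ci.2], p.2)
      else if parseQA queue ci.1 < cylinder then (p.1, p.2 ++ [ci.2])
      else p)
    ([], [])
  if acc.1.length > 0 then
    Int.ofNat ((PySem.List.index? queue (PySem.List.pyGetD (sortCscanA acc.1) 0 "")).getD 0)
  else if acc.2.length > 0 then
    Int.ofNat ((PySem.List.index? queue (PySem.List.pyGetD (sortCscanA acc.2) 0 "")).getD 0)
  else 0

-- ===== PORT B =====

-- int(s.split(',')[0]) (same defaulting, unreachable under Pre_cscanLocation)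
def cylB (s : String) : Int :=
  (PySem.Int.ofStr? (((PySem.Str.split? s ",").getD []).headD "")).getD 0

def cscanLocation_alt (queue : List String) (cylinder : Int) : Int :=
  let st := queue.foldl
    (fun (st : Option (String × Int) × Option (String × Int)) s =>
      let c := cylB s
      if c ≥ cylinder then
        match st.1 with
        | none => (some (s, c), st.2)
        | some b => if c ≤ b.2 then (some (s, c), st.2) else st
      else
        match st.2 with
        | none => (st.1, some (s, c))
        | some b => if c ≤ b.2 then (st.1, some (s, c)) else st)
    (none, none)
  match st.1.orElse (fun _ => st.2) with
  | some b => Int.ofNat ((PySem.List.index? queue b.1).getD 0)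
  | none => 0

-- ===== PRECONDITION & SPEC =====

-- Pre_ excludes exactly the inputs where Python's int() raises ValueError: some queue entry
-- whose field before the first ',' does not parse as an int.
def Pre_cscanLocation (queue : List String) (cylinder : Int) : Prop :=
  ∀ s ∈ queue, (PySem.Int.ofStr? (((PySem.Str.split? s ",").getD []).headD "")).isSome

instance (queue : List String) (cylinder : Int) : Decidable (Pre_cscanLocation queue cylinder) := by
  unfold Pre_cscanLocation; infer_instance

def pvWitness_cscanLocation : List String × Int := (["95,3", "12,1", "40,2"], 30)

def Spec_cscanLocation (queue : List String) (cylinder : Int) (out : Int) : Prop := out = cscanLocation_alt queue cylinder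
instance (queue : List String) (cylinder : Int) (out : Int) : Decidable (Spec_cscanLocation queue cylinder out) := by unfold Spec_cscanLocation; infer_instance

-- ===== CLAIM (what is proved, stated in full; the proofs are below) =====
def Claim_equal_cscanLocation : Prop := ∀ (queue : List String) (cylinder : Int), Dom_cscanLocation queue cylinder → Pre_cscanLocation queue cylinder → Spec_cscanLocation queue cylinder (cscanLocation queue cylinder)

-- ===== LEMMAS AND PROOFS =====


-- the "last running minimum" selection both programs compute on a nonempty group
def stepF (b x : String) : String := if cylB x ≤ cylB b then x else b

-- one best-candidate update step of B (the cached Int is always cylB of the cached String)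
def stepO (b : Option (String × Int)) (x : String) : Option (String × Int) :=
  match b with
  | none => some (x, cylB x)
  | some p => if cylB x ≤ p.2 then some (x, cylB x) else some p

-- the body of sortCscan's loop, named for the proofs
def swapStepA (arr : List String) (highI : Nat) : List String :=
  if parseQA arr (highI : Int) ≤ parseQA arr 0 then
    PySem.List.pySetD (PySem.List.pySetD arr 0 (PySem.List.pyGetD arr (highI : Int) ""))
      (highI : Int) (PySem.List.pyGetD arr 0 "")
  else arr

theorem sortCscanA_eq (arr : List String) :
    sortCscanA arr = (List.range arr.length).foldl swapStepA arr := rfl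

theorem parseQA_natCast (q : List String) (n : Nat) :
    parseQA q (n : Int) = cylB (q.getD n "") := by
  unfold parseQA cylB
  by_cases h : n = 0
  · subst h; simp [PySem.List.pyGet?_zero]
  · simp [h]

theorem parseQA_zero (q : List String) : parseQA q 0 = cylB (q.getD 0 "") := by
  have := parseQA_natCast q 0
  simpa using this

theorem swapStepA_eq (arr : List String) (i : Nat) :
    swapStepA arr i =
      if cylB (arr.getD i "") ≤ cylB (arr.getD 0 "") then
        (arr.set 0 (arr.getD i "")).set i (arr.getD 0 "")
      else arr := by
  unfold swapStepA
  rw [parseQA_natCast, parseQA_zero]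
  simp [PySem.List.pySetD_of_nonneg, PySem.List.pyGetD_natCast, PySem.List.pyGetD_zero]

theorem sortA_inv (h : String) (t : List String) (k : Nat) (hk : k ≤ t.length + 1) :
    ((List.range k).foldl swapStepA (h :: t)).length = t.length + 1 ∧
    (∀ j, k ≤ j → ((List.range k).foldl swapStepA (h :: t)).getD j "" = (h :: t).getD j "") ∧
    (1 ≤ k → ((List.range k).foldl swapStepA (h :: t)).getD 0 "" = (t.take (k-1)).foldl stepF h) := by
  induction k with
  | zero => exact ⟨by simp, fun j _ => rfl, by omega⟩
  | succ k ih =>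
    obtain ⟨hlen, hrest, hhead⟩ := ih (by omega)
    have hfold : (List.range (k+1)).foldl swapStepA (h :: t)
        = swapStepA ((List.range k).foldl swapStepA (h :: t)) k := by
      rw [List.range_succ, List.foldl_append, List.foldl_cons, List.foldl_nil]
    rw [hfold]
    generalize hS : (List.range k).foldl swapStepA (h :: t) = s at hlen hrest hhead
    rw [swapStepA_eq]
    have hslen : 0 < s.length := by omega
    by_cases hk0 : k = 0
    · subst hk0
      have hs0 : s = h :: t := by rw [← hS]; rfl
      simp [hs0, List.getD]
    · -- 1 ≤ k, and k ≤ t.length from hk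
      obtain ⟨m, rfl⟩ : ∃ m, k = m + 1 := ⟨k - 1, by omega⟩
      simp only [Nat.add_sub_cancel] at hhead ⊢
      have hkm : m < t.length := by omega
      have hsk : s.getD (m+1) "" = t[m] := by
        rw [hrest (m+1) le_rfl]
        simp [List.getD, List.getElem?_eq_getElem hkm]
      have hs0 : s.getD 0 "" = (t.take m).foldl stepF h := hhead (by omega)
      have htake : t.take (m+1) = t.take m ++ [t[m]] := by
        rw [List.take_add_one, List.getElem?_eq_getElem hkm]; rfl
      have htgt : (t.take (m+1)).foldl stepF h = stepF ((t.take m).foldl stepF h) t[m] := by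
        rw [htake, List.foldl_append]; rfl
      by_cases hc : cylB (s.getD (m+1) "") ≤ cylB (s.getD 0 "")
      · rw [if_pos hc]
        refine ⟨by simp [hlen], ?_, ?_⟩
        · intro j hj
          rw [List.getD_eq_getElem?_getD, List.getElem?_set_ne (by omega),
            List.getElem?_set_ne (by omega), ← List.getD_eq_getElem?_getD]
          exact hrest j (by omega)
        · intro _
          rw [List.getD_eq_getElem?_getD, List.getElem?_set_ne (by omega),
            List.getElem?_set_self (by omega), Option.getD_some, htgt]
          have hcc : cylB t[m] ≤ cylB ((t.take m).foldl stepF h) := by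
            rw [← hsk, ← hs0]; exact hc
          rw [hsk]
          simp [stepF, hcc]
      · rw [if_neg hc]
        refine ⟨hlen, fun j hj => hrest j (by omega), fun _ => ?_⟩
        rw [hs0, htgt]
        have hcc : ¬ cylB t[m] ≤ cylB ((t.take m).foldl stepF h) := by
          rw [← hsk, ← hs0]; exact hc
        simp [stepF, hcc]

theorem sortCscanA_head (h : String) (t : List String) :
    PySem.List.pyGetD (sortCscanA (h :: t)) 0 "" = t.foldl stepF h := by
  have hinv := (sortA_inv h t (t.length + 1) le_rfl).2.2 (by omega)
  rw [sortCscanA_eq]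
  simp only [List.length_cons] at hinv ⊢
  rw [PySem.List.pyGetD_zero]
  simpa [List.take_length] using hinv

-- A's first loop over enumerate(queue) splits queue into the two filtered groups
theorem foldFilters (cylinder : Int) (l : List (Int × String)) (a b : List String) :
    l.foldl (fun (p : List String × List String) ci =>
        if cylinder ≤ cylB ci.2 then (p.1 ++ [ci.2], p.2) else (p.1, p.2 ++ [ci.2])) (a, b)
    = (a ++ (l.map (·.2)).filter (fun x => decide (cylinder ≤ cylB x)),
       b ++ (l.map (·.2)).filter (fun x => decide (cylB x < cylinder))) := by
  induction l generalizing a b with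
  | nil => simp
  | cons x l ih =>
    by_cases hx : cylinder ≤ cylB x.2
    · have hx' : ¬ (cylB x.2 < cylinder) := by omega
      simp [hx, hx', ih]
    · have hx' : cylB x.2 < cylinder := by omega
      simp [hx, hx', ih]

theorem foldA (queue : List String) (cylinder : Int) :
    (PySem.List.enumerate queue).foldl
      (fun (p : List String × List String) ci =>
        if parseQA queue ci.1 ≥ cylinder then (p.1 ++ [ci.2], p.2)
        else if parseQA queue ci.1 < cylinder then (p.1, p.2 ++ [ci.2])
        else p) ([], [])
    = (queue.filter (fun x => decide (cylinder ≤ cylB x)),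
       queue.filter (fun x => decide (cylB x < cylinder))) := by
  have hcongr : ∀ (p : List String × List String) ci, ci ∈ PySem.List.enumerate queue →
      (if parseQA queue ci.1 ≥ cylinder then (p.1 ++ [ci.2], p.2)
       else if parseQA queue ci.1 < cylinder then (p.1, p.2 ++ [ci.2]) else p)
      = (if cylinder ≤ cylB ci.2 then (p.1 ++ [ci.2], p.2) else (p.1, p.2 ++ [ci.2])) := by
    intro p ci hci
    rw [PySem.List.mem_enumerate_iff] at hci
    obtain ⟨k, hk, rfl⟩ := hci
    have h1 : parseQA queue (0 + (k:Int)) = cylB queue[k] := by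
      rw [zero_add, parseQA_natCast, List.getD_eq_getElem?_getD, List.getElem?_eq_getElem hk]
      rfl
    simp only [h1]
    by_cases hc : cylinder ≤ cylB queue[k]
    · rw [if_pos (by omega), if_pos hc]
    · rw [if_neg (by omega), if_pos (by omega), if_neg hc]
  rw [PySem.List.foldl_congr_mem _ _ _ _ hcongr, foldFilters, PySem.List.map_snd_enumerate]
  simp

-- B's loop computes the two running bests of the filtered groups
theorem foldB (cylinder : Int) (l : List String) (bh bl : Option (String × Int)) :
    l.foldl
      (fun (st : Option (String × Int) × Option (String × Int)) s =>
        let c := cylB s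
        if c ≥ cylinder then
          match st.1 with
          | none => (some (s, c), st.2)
          | some b => if c ≤ b.2 then (some (s, c), st.2) else st
        else
          match st.2 with
          | none => (st.1, some (s, c))
          | some b => if c ≤ b.2 then (st.1, some (s, c)) else st)
      (bh, bl)
    = ((l.filter (fun x => decide (cylinder ≤ cylB x))).foldl stepO bh,
       (l.filter (fun x => decide (cylB x < cylinder))).foldl stepO bl) := by
  induction l generalizing bh bl with
  | nil => rfl
  | cons x l ih =>
    by_cases hc : cylB x ≥ cylinder
    · have hc' : ¬ (cylB x < cylinder) := by omega
      have h1 : (match bh with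
          | none => (some (x, cylB x), bl)
          | some b => if cylB x ≤ b.2 then (some (x, cylB x), bl) else (bh, bl))
          = (stepO bh x, bl) := by
        cases bh with
        | none => rfl
        | some p => simp only [stepO]; split <;> rfl
      simp only [List.foldl_cons, List.filter_cons, hc, hc', decide_true, decide_false,
        if_true, if_false, ge_iff_le]
      rw [ih, h1]
      simp
    · have hc' : cylB x < cylinder := by omega
      have hle : ¬ (cylinder ≤ cylB x) := by omega
      have h1 : (match bl with
          | none => (bh, some (x, cylB x))
          | some b => if cylB x ≤ b.2 then (bh, some (x, cylB x)) else (bh, bl))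
          = (bh, stepO bl x) := by
        cases bl with
        | none => rfl
        | some p => simp only [stepO]; split <;> rfl
      simp only [List.foldl_cons, List.filter_cons, hle, hc', decide_true, decide_false,
        if_true, if_false, ge_iff_le]
      rw [ih, h1]
      simp

theorem foldO_some (b : String) (t : List String) :
    t.foldl stepO (some (b, cylB b)) = some (t.foldl stepF b, cylB (t.foldl stepF b)) := by
  induction t generalizing b with
  | nil => rfl
  | cons x t ih =>
    simp only [List.foldl_cons, stepO, stepF]
    by_cases hc : cylB x ≤ cylB b
    · rw [if_pos hc, if_pos hc]; exact ih x
    · rw [if_neg hc, if_neg hc]; exact ih b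

-- ===== VERDICT (by name: the statement is the Claim_ definition above) =====
theorem cscanLocation_spec : Claim_equal_cscanLocation := by
  intro queue cylinder _ _
  unfold Spec_cscanLocation cscanLocation cscanLocation_alt
  rw [foldA, foldB]
  rcases hH : queue.filter (fun x => decide (cylinder ≤ cylB x)) with _ | ⟨h, t⟩
  · rcases hL : queue.filter (fun x => decide (cylB x < cylinder)) with _ | ⟨l, u⟩
    · simp
    · simp [sortCscanA_head]
      rw [show stepO none l = some (l, cylB l) from rfl, foldO_some]
  · simp [sortCscanA_head]
    rw [show stepO none h = some (h, cylB h) from rfl, foldO_some]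
    simp
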